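-- pv_equiv track=rewrite | github.com/Nonameg1123/training12 | day7/maxgoldrrecur.py | rec
-- ===== SOURCE A (Python) =====
-- def rec(l):
--     if len(l)==0:
--         return 0
--     if len(l)==1:
--         return l[0]
--     if len(l)==2:
--         return max(l[0],l[1])
--     ls=l[0]+rec(l[2:])
--     rs=l[1]+rec(l[3:])
--     return max(ls,rs)
-- ===== SOURCE B (Python) =====
-- def rec(l):
--     # Bottom-up O(n) DP over suffixes, right to left, keeping only the last
--     # three suffix values (r0, r1, r2) = (rec(l[i+1:]), rec(l[i+2:]), rec(l[i+3:])).
--     n = len(l)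
--     r0 = r1 = r2 = 0
--     for i in range(n - 1, -1, -1):
--         if i == n - 1:
--             cur = l[i]
--         else:
--             cur = max(l[i] + r1, l[i + 1] + r2)
--         r0, r1, r2 = cur, r0, r1
--     return r0
-- ===== Notes on version B (the rewrite author's own statement) =====
-- stated objective: alternative
-- what changed: Replaced the exponential branching recursion over suffixes with a right-to-left bottom-up DP keeping only the last three suffix optima; intended as asymptotically faster (a timing run saw A time out at n=64 where B returned, but could not measure a ratio).
import Mathlib
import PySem

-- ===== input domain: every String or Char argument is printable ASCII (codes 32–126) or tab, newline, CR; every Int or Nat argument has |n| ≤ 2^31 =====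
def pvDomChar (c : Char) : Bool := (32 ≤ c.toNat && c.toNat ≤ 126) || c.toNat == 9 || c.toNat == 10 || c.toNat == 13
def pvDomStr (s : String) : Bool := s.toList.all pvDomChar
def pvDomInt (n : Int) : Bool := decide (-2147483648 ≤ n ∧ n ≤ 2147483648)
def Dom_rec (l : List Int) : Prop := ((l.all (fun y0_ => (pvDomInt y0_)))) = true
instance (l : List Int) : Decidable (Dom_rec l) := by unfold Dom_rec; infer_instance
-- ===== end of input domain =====

-- B replaces A's branching recursion over suffixes with a right-to-left bottom-up
-- pass keeping only the last three suffix optima (alternative decomposition; intended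
-- as the linear-time form of the same recurrence).
-- ===== PORT A =====
-- Literal port of A: branching recursion over suffixes (l[2:] and l[3:]).
def rec : List Int → Int
  | [] => 0
  | [a] => a
  | [a, b] => max a b
  | a :: b :: c :: rest => max (a + rec (c :: rest)) (b + rec rest)

-- ===== PORT B =====
-- Port of B: right-to-left pass keeping the three most recent suffix optima
-- (r0, r1, r2). recGo rest returns the state after processing rest.
def recGo : List Int → Int × Int × Int
  | [] => (0, 0, 0)
  | x :: rest =>
    let s := recGo rest
    let cur := match rest with
      | [] => x
      | y :: _ => max (x + s.2.1) (y + s.2.2)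
    (cur, s.1, s.2.1)

def rec_alt (l : List Int) : Int := (recGo l).1

-- ===== PRECONDITION & SPEC =====
def Spec_rec (l : List Int) (out : Int) : Prop := out = rec_alt l
instance (l : List Int) (out : Int) : Decidable (Spec_rec l out) := by unfold Spec_rec; infer_instance

-- ===== CLAIM (what is proved, stated in full; the proofs are below) =====
def Claim_equal_rec : Prop := ∀ (l : List Int), Dom_rec l → Spec_rec l (rec l)

-- ===== LEMMAS AND PROOFS =====
theorem recGo_eq (l : List Int) :
    recGo l = (rec l, rec l.tail, rec l.tail.tail) := by
  induction l with
  | nil => simp [recGo, rec]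
  | cons a l ih =>
    cases l with
    | nil => simp [recGo, rec]
    | cons y rest =>
      cases rest with
      | nil => simp [recGo, rec] at ih ⊢
      | cons c r =>
        show recGo (a :: y :: c :: r) = _
        rw [show recGo (a :: y :: c :: r) =
            (max (a + (recGo (y :: c :: r)).2.1) (y + (recGo (y :: c :: r)).2.2),
             (recGo (y :: c :: r)).1, (recGo (y :: c :: r)).2.1) from rfl, ih]
        simp [rec]

-- ===== VERDICT (by name: the statement is the Claim_ definition above) =====
theorem rec_spec : Claim_equal_rec := by
  intro l _
  unfold Spec_rec rec_alt
  rw [recGo_eq]
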